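-- pv_equiv track=rewrite | github.com/Morcroc/Computacion-UBA | IP/Python/guia7.py | tiene_palabra_larga
-- ===== SOURCE A (Python) =====
-- def tiene_palabra_larga(lista:list) -> bool:
--     res:bool = False
--     # tengo que hacer que sea true si una de las palabras que aparecen en la frase tiene >7 letras
--     # esto se puede hacer separando primero las palabras y despues contando su longitud
--     i:int = 0
--     palabra:list = []
--     while (i < len(lista) and not res):
--         if(lista[i] != ' '):
--             palabra.append(lista[i])
--         else:
--             res = len(palabra) > 7
--             palabra.clear()
--         i += 1
--     return res
-- ===== SOURCE B (Python) =====
-- def tiene_palabra_larga(lista: list) -> bool: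
--     # Phase 1: collect the indices of the separators.
--     espacios = []
--     for i, x in enumerate(lista):
--         if x == ' ':
--             espacios.append(i)
--     # Phase 2: a word longer than 7 is a gap > 7 between consecutive separators.
--     prev = -1
--     for s in espacios:
--         if s - prev - 1 > 7:
--             return True
--         prev = s
--     return False
-- ===== Notes on version B (the rewrite author's own statement) =====
-- stated objective: alternative
-- what changed: Replaces A's single scan that accumulates the current word in a list with a two-phase traversal: first collect all separator indices, then scan that index list computing each word length as the gap between consecutive separators.
import Mathlib
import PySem

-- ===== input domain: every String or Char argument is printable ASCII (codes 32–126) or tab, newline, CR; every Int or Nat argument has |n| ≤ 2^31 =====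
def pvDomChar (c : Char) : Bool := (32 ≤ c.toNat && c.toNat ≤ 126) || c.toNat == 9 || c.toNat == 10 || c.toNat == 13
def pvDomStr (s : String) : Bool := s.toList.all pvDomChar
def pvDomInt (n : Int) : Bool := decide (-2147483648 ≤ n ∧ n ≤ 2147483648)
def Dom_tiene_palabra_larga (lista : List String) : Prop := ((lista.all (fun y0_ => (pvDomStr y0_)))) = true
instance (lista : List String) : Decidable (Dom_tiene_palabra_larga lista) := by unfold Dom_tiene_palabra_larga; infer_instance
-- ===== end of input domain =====

-- B re-implements A's scan as a two-phase traversal (separator indices, then gap lengths); return values proved equal on all inputs.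

-- ===== PORT A =====
-- while (i < len(lista) and not res): accumulate `palabra`, reset at every ' '
def pvLoopA (lista : List String) (i : Nat) (palabra : List String) (res : Bool) : Bool :=
  if h : i < lista.length ∧ res = false then
    if lista[i]'h.1 ≠ " " then
      pvLoopA lista (i + 1) (palabra ++ [lista[i]'h.1]) res
    else
      pvLoopA lista (i + 1) [] (decide (palabra.length > 7))
  else res
termination_by lista.length - i
decreasing_by all_goals omega

def tiene_palabra_larga (lista : List String) : Bool :=
  pvLoopA lista 0 [] false

-- ===== PORT B =====
-- phase 1: collect indices of ' ' elements (enumerate loop)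
def pvEspacios (k : Int) : List String → List Int
  | [] => []
  | x :: rest => if x = " " then k :: pvEspacios (k + 1) rest else pvEspacios (k + 1) rest

-- phase 2: word length = gap between consecutive separator indices
def pvLoopB (prev : Int) : List Int → Bool
  | [] => false
  | s :: rest => if s - prev - 1 > 7 then true else pvLoopB s rest

def tiene_palabra_larga_alt (lista : List String) : Bool :=
  pvLoopB (-1) (pvEspacios 0 lista)

-- ===== PRECONDITION & SPEC =====
def Spec_tiene_palabra_larga (lista : List String) (out : Bool) : Prop := out = tiene_palabra_larga_alt lista
instance (lista : List String) (out : Bool) : Decidable (Spec_tiene_palabra_larga lista out) := by unfold Spec_tiene_palabra_larga; infer_instance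

-- ===== CLAIM (what is proved, stated in full; the proofs are below) =====
def Claim_equal_tiene_palabra_larga : Prop := ∀ (lista : List String), Dom_tiene_palabra_larga lista → Spec_tiene_palabra_larga lista (tiene_palabra_larga lista)

-- ===== LEMMAS AND PROOFS =====

-- common reference function: recurse over the list keeping the current word length
def pvRef : List String → Nat → Bool
  | [], _ => false
  | x :: rest, c => if x = " " then (decide (c > 7) || pvRef rest 0) else pvRef rest (c + 1)

theorem pvLoopA_true (lista : List String) (i : Nat) (pal : List String) :
    pvLoopA lista i pal true = true := by
  unfold pvLoopA; simp

theorem pvLoopA_eq_ref (n : Nat) (lista : List String) (i : Nat) (pal : List String)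
    (hn : lista.length - i = n) :
    pvLoopA lista i pal false = pvRef (lista.drop i) pal.length := by
  induction n generalizing i pal with
  | zero =>
    have hi : ¬ i < lista.length := by omega
    have hd : lista.drop i = [] := List.drop_eq_nil_of_le (by omega)
    unfold pvLoopA
    rw [dif_neg (by simp [hi]), hd]
    simp [pvRef]
  | succ n ih =>
    have hi : i < lista.length := by omega
    have hcond : i < lista.length ∧ (false : Bool) = false := ⟨hi, rfl⟩
    have hdrop : lista.drop i = lista[i] :: lista.drop (i + 1) :=
      List.drop_eq_getElem_cons hi
    unfold pvLoopA
    rw [dif_pos hcond, hdrop]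
    by_cases hx : lista[i] = " "
    · rw [if_neg (by simp [hx])]
      simp only [pvRef, if_pos hx]
      by_cases hlen : pal.length > 7
      · simp [hlen, pvLoopA_true]
      · simp only [decide_eq_false hlen, Bool.false_or]
        have := ih (i + 1) [] (by omega)
        simpa using this
    · rw [if_pos hx]
      simp only [pvRef, if_neg hx]
      have := ih (i + 1) (pal ++ [lista[i]]) (by omega)
      simpa using this

theorem pvLoopB_eq_ref (lista : List String) (prev : Int) (c : Nat) :
    pvLoopB prev (pvEspacios (prev + 1 + c) lista) = pvRef lista c := by
  induction lista generalizing prev c with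
  | nil => simp [pvEspacios, pvLoopB, pvRef]
  | cons x rest ih =>
    by_cases hx : x = " "
    · subst hx
      simp only [pvEspacios, pvLoopB, pvRef, if_pos]
      have hgap : prev + 1 + (c : Int) - prev - 1 = (c : Int) := by ring
      rw [hgap]
      by_cases hc : c > 7
      · have hci : ((c : Int) > 7) := by exact_mod_cast hc
        simp [hci, hc]
      · have h1 : ¬ ((c : Int) > 7) := by exact_mod_cast hc
        rw [if_neg h1]
        simp only [decide_eq_false hc, Bool.false_or]
        have h2 : prev + 1 + (c : Int) + 1 = (prev + 1 + (c : Int)) + 1 + ((0 : Nat) : Int) := by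
          simp
        rw [h2, ih]
    · simp only [pvEspacios]
      rw [if_neg hx]
      simp only [pvRef, if_neg hx]
      have h2 : prev + 1 + (c : Int) + 1 = prev + 1 + ((c + 1 : Nat) : Int) := by
        push_cast; ring
      rw [h2, ih]

-- ===== VERDICT (by name: the statement is the Claim_ definition above) =====
theorem tiene_palabra_larga_spec : Claim_equal_tiene_palabra_larga := by
  intro lista _
  unfold Spec_tiene_palabra_larga tiene_palabra_larga tiene_palabra_larga_alt
  rw [pvLoopA_eq_ref lista.length lista 0 [] rfl]
  have h0 : (0 : Int) = -1 + 1 + ((0 : Nat) : Int) := by simp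
  rw [h0, pvLoopB_eq_ref]
  simp
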